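-- pv_equiv track=rewrite | github.com/Lucas-L-S-Haine/39-restaurant-orders | src/analyze_log.py | joao_orders
-- ===== SOURCE A (Python) =====
-- def joao_orders(orders):
--     total_orders = {order["pedido"]: 0 for order in orders}
--     for order in orders:
--         cliente = order["cliente"]
--         pedido = order["pedido"]
--         if cliente == "joao":
--             total_orders[pedido] += 1
--     return total_orders
-- ===== SOURCE B (Python) =====
-- def joao_orders(orders):
--     # different algorithm: no mutable counters at all — collect the distinct pedido
--     # types in first-appearance order, then compute each count independently by a
--     # per-key scan (sum of booleans).
--     kinds = list(dict.fromkeys(order["pedido"] for order in orders))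
--     return {
--         kind: sum(order["cliente"] == "joao" and order["pedido"] == kind
--                   for order in orders)
--         for kind in kinds
--     }
-- ===== Notes on version B (the rewrite author's own statement) =====
-- stated objective: alternative
-- what changed: Replaces A's incremental counter dict (seed keys to 0, then mutate-increment per joao order) with a counterless formulation: dedup the pedido types in first-appearance order, then build the result by computing each count independently with a per-key scan (sum of booleans); trades A's O(n) single table for an O(n*k) per-key count.
import Mathlib
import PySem

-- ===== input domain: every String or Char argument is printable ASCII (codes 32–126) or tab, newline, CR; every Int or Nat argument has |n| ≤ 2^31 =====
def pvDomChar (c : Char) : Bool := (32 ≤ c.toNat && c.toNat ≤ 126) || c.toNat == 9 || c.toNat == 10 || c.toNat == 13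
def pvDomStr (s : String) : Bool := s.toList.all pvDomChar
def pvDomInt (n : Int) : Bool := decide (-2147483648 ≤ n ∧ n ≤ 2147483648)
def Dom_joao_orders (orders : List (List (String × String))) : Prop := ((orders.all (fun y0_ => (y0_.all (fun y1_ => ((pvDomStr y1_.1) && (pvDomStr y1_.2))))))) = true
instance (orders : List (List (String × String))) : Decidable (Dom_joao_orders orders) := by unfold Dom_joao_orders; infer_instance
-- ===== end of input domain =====

-- B replaces A's incremental counter dict with a counterless formulation: dedup the
-- pedido types in first-appearance order, then compute each count by a per-key scan.


-- ===== PORT A =====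
-- order[k] for a dict-as-association-list: first match; the .getD "" default is never
-- reached on inputs satisfying Pre_ (both keys present), exactly where Python returns.
def pvKey (o : List (String × String)) (k : String) : String := (List.lookup k o).getD ""

def joao_orders (orders : List (List (String × String))) : List (String × Int) :=
  let total : PySem.Dict String Int :=
    orders.foldl (fun d o => d.insert (pvKey o "pedido") 0) PySem.Dict.empty
  (orders.foldl (fun d o =>
      let cliente := pvKey o "cliente"
      let pedido := pvKey o "pedido"
      if cliente == "joao" then d.modify pedido 0 (· + 1) else d) total).items

-- ===== PORT B =====
-- list(dict.fromkeys(…)) = distinct pedidos in first-appearance order (PySem.Set.ofList);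
-- sum(bool for order in orders) = countP over orders.
def joao_orders_alt (orders : List (List (String × String))) : List (String × Int) :=
  let kinds : List String := PySem.Set.ofList (orders.map (fun o => pvKey o "pedido"))
  kinds.map (fun kind =>
    (kind, (orders.countP (fun o =>
        pvKey o "cliente" == "joao" && pvKey o "pedido" == kind) : Int)))

-- ===== PRECONDITION & SPEC =====
-- Pre_ excludes exactly the inputs where Python A raises KeyError: an order missing
-- the "pedido" or "cliente" key (B raises there too).
def Pre_joao_orders (orders : List (List (String × String))) : Prop :=
  ∀ o ∈ orders, (List.lookup "pedido" o).isSome = true ∧ (List.lookup "cliente" o).isSome = true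
instance (orders : List (List (String × String))) : Decidable (Pre_joao_orders orders) := by unfold Pre_joao_orders; infer_instance

def pvWitness_joao_orders : (List (List (String × String))) :=
  [[("pedido", "pizza"), ("cliente", "joao")], [("pedido", "suco"), ("cliente", "ana")]]

def Spec_joao_orders (orders : List (List (String × String))) (out : List (String × Int)) : Prop := out = joao_orders_alt orders
instance (orders : List (List (String × String))) (out : List (String × Int)) : Decidable (Spec_joao_orders orders out) := by unfold Spec_joao_orders; infer_instance

-- ===== CLAIM (what is proved, stated in full; the proofs are below) =====
def Claim_equal_joao_orders : Prop := ∀ (orders : List (List (String × String))), Dom_joao_orders orders → Pre_joao_orders orders → Spec_joao_orders orders (joao_orders orders)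

-- ===== LEMMAS AND PROOFS =====

-- readable names for the two fields and A's loop bodies (definitionally equal to the ports' lambdas)
def pvPed (o : List (String × String)) : String := pvKey o "pedido"
def pvIsJoao (o : List (String × String)) : Bool := pvKey o "cliente" == "joao"

def pvStepSeed (d : PySem.Dict String Int) (o : List (String × String)) : PySem.Dict String Int :=
  d.insert (pvPed o) 0
def pvStepIncr (d : PySem.Dict String Int) (o : List (String × String)) : PySem.Dict String Int :=
  if pvIsJoao o then d.modify (pvPed o) 0 (· + 1) else d

-- how many of l's orders are joao's with pedido k
def pvCnt (l : List (List (String × String))) (k : String) : Nat :=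
  l.countP (fun o => pvIsJoao o && (pvPed o == k))

lemma pvCnt_cons (o : List (String × String)) (r : List (List (String × String))) (k : String) :
    pvCnt (o :: r) k = (if pvIsJoao o ∧ pvPed o = k then 1 else 0) + pvCnt r k := by
  simp only [pvCnt, List.countP_cons]
  by_cases h1 : pvIsJoao o = true
  · by_cases h2 : pvPed o = k
    · simp [h1, h2]
      omega
    · simp [h1, h2]
  · simp [h1]

lemma pvKeys_mapped (S : List String) (f : String → Int) :
    (PySem.Dict.mk (S.map (fun k => (k, f k)))).keys = S := by
  simp [PySem.Dict.keys, Function.comp_def]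

lemma pvContains_mapped (S : List String) (f : String → Int) (p : String) :
    (PySem.Dict.mk (S.map (fun k => (k, f k)))).contains p = decide (p ∈ S) := by
  rw [PySem.Dict.contains_eq_decide_mem_keys, pvKeys_mapped]

lemma pvGetD_mapped (S : List String) (f : String → Int) (p : String)
    (hS : S.Nodup) (hp : p ∈ S) (d0 : Int) :
    (PySem.Dict.mk (S.map (fun k => (k, f k)))).getD p d0 = f p := by
  apply PySem.Dict.getD_of_mem_items
  · exact List.mem_map_of_mem hp
  · rw [pvKeys_mapped]; exact hS

-- bumping a present key of a mapped dict
lemma pvBump_mapped (S : List String) (f : String → Int) (p : String)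
    (hS : S.Nodup) (hp : p ∈ S) :
    ((PySem.Dict.mk (S.map (fun k => (k, f k)))).modify p 0 (· + 1))
      = PySem.Dict.mk (S.map (fun k => (k, if k = p then f p + 1 else f k))) := by
  apply PySem.Dict.ext
  rw [PySem.Dict.modify, pvGetD_mapped S f p hS hp]
  rw [PySem.Dict.items_insert_of_contains _ _ ((pvContains_mapped S f p).trans (decide_eq_true hp))]
  rw [List.map_map]
  apply List.map_congr_left
  intro k hk
  by_cases h : k = p <;> simp [h]

-- PHASE 1 of A: the seeding fold
lemma pvSeed_char (l : List (List (String × String))) :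
    (l.foldl pvStepSeed (PySem.Dict.empty : PySem.Dict String Int))
      = PySem.Dict.mk ((PySem.Set.ofList (l.map pvPed)).map (fun k => (k, (0 : Int)))) := by
  induction l using List.reverseRecOn with
  | nil => rfl
  | append_singleton l o ih =>
    rw [List.foldl_append, List.foldl_cons, List.foldl_nil, List.map_append, List.map_cons,
        List.map_nil, PySem.Set.ofList_append_singleton, ih]
    show (PySem.Dict.mk _).insert (pvPed o) 0 = _
    by_cases hp : pvPed o ∈ PySem.Set.ofList (l.map pvPed)
    · rw [PySem.Set.add_of_mem hp]
      apply PySem.Dict.ext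
      rw [PySem.Dict.items_insert_of_contains _ _ ((pvContains_mapped _ _ _).trans (decide_eq_true hp))]
      rw [List.map_map]
      apply List.map_congr_left
      intro k hk
      by_cases h : k = pvPed o <;> simp [h]
    · rw [PySem.Set.add_of_not_mem hp]
      apply PySem.Dict.ext
      rw [PySem.Dict.items_insert_of_not_contains _ _ ((pvContains_mapped _ _ _).trans (decide_eq_false hp)),
          List.map_append]
      rfl

-- PHASE 2 of A: the increment fold over a mapped dict whose keys cover every pedido of l
lemma pvIncr_char (l : List (List (String × String))) (S : List String)
    (hS : S.Nodup) (hcov : ∀ o ∈ l, pvPed o ∈ S) (f : String → Int) :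
    (l.foldl pvStepIncr (PySem.Dict.mk (S.map (fun k => (k, f k))))).items
      = S.map (fun k => (k, f k + pvCnt l k)) := by
  induction l generalizing f with
  | nil => simp [pvCnt]
  | cons o r ih =>
    rw [List.foldl_cons]
    by_cases hj : pvIsJoao o = true
    · have hstep : pvStepIncr (PySem.Dict.mk (S.map (fun k => (k, f k)))) o
          = PySem.Dict.mk (S.map (fun k => (k, if k = pvPed o then f (pvPed o) + 1 else f k))) := by
        rw [pvStepIncr, if_pos hj, pvBump_mapped S f (pvPed o) hS (hcov o List.mem_cons_self)]
      rw [hstep, ih (fun o' ho' => hcov o' (List.mem_cons_of_mem _ ho'))]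
      apply List.map_congr_left
      intro k hk
      rw [pvCnt_cons]
      by_cases h : k = pvPed o
      · simp only [h, hj, if_pos, and_self]
        push_cast
        ring_nf
      · simp only [h, hj, if_false, Prod.mk.injEq, true_and]
        have hne : ¬(pvPed o = k) := fun he => h he.symm
        simp [hne]
    · have hstep : pvStepIncr (PySem.Dict.mk (S.map (fun k => (k, f k)))) o
          = PySem.Dict.mk (S.map (fun k => (k, f k))) := by
        rw [pvStepIncr, if_neg hj]
      rw [hstep, ih (fun o' ho' => hcov o' (List.mem_cons_of_mem _ ho'))]
      apply List.map_congr_left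
      intro k hk
      rw [pvCnt_cons]
      simp [hj]

-- ===== VERDICT (by name: the statement is the Claim_ definition above) =====
theorem joao_orders_spec : Claim_equal_joao_orders := by
  intro orders _ _
  show (orders.foldl pvStepIncr (orders.foldl pvStepSeed PySem.Dict.empty)).items
      = (PySem.Set.ofList (orders.map pvPed)).map (fun k =>
          (k, (orders.countP (fun o => pvIsJoao o && (pvPed o == k)) : Int)))
  have hcov : ∀ o ∈ orders, pvPed o ∈ PySem.Set.ofList (orders.map pvPed) := by
    intro o ho; rw [PySem.Set.mem_ofList]; exact List.mem_map_of_mem ho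
  rw [pvSeed_char, pvIncr_char orders _ (PySem.Set.nodup_ofList _) hcov]
  apply List.map_congr_left
  intro k hk
  simp [pvCnt]
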